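-- pv_equiv track=rewrite | github.com/OmarNour/data_cleansing | data_cleansing/dc_methods/dc_methods.py | get_start_end_index
-- ===== SOURCE A (Python) =====
-- def get_start_end_index(total_rows, chunk_size):
--     start_index = 0
--     end_index = min(chunk_size, total_rows)
--     max_index = total_rows
--     while start_index < end_index:
--         yield start_index, end_index
--         start_index = min(end_index, max_index)
--         end_index = min(end_index + chunk_size, max_index)
-- ===== SOURCE B (Python) =====
-- def get_start_end_index(total_rows, chunk_size):
--     # Two staged passes: build the list of chunk boundaries once,
--     # then pair adjacent boundaries -- no running start/end state.
--     if chunk_size <= 0 or total_rows <= 0: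
--         return
--     bounds = list(range(0, total_rows, chunk_size)) + [total_rows]
--     yield from zip(bounds, bounds[1:])
-- ===== Notes on version B (the rewrite author's own statement) =====
-- stated objective: alternative
-- what changed: Replaced A's incremental min-clamped start/end state machine with two staged passes: materialise the chunk-boundary list range(0, total_rows, chunk_size) + [total_rows] once, then pair adjacent boundaries with zip.
import Mathlib
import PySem

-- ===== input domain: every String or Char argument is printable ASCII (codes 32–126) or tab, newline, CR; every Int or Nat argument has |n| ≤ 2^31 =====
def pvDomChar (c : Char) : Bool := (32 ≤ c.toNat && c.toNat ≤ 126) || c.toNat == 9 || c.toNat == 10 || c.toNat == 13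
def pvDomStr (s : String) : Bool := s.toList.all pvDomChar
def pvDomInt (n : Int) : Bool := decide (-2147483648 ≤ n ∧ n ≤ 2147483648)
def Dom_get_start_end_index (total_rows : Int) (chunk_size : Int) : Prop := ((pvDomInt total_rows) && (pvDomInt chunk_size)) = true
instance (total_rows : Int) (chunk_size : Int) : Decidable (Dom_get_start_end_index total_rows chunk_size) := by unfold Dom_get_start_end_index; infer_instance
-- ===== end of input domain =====

-- B replaces A's running start/end state machine by two staged passes: build the
-- chunk-boundary list once, then pair adjacent boundaries; same cost, alternative decomposition.

-- ===== PORT A =====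
-- the while-loop: state (start_index, end_index); the invariant end_index ≤ max_index
-- (true at both call sites) is carried as a hypothesis only to justify termination.
def pvLoopA (max_index chunk_size start_index end_index : Int)
    (h : end_index ≤ max_index) : List (Int × Int) :=
  if hlt : start_index < end_index then
    (start_index, end_index) ::
      pvLoopA max_index chunk_size (min end_index max_index)
        (min (end_index + chunk_size) max_index) (min_le_right _ _)
  else []
termination_by (max_index - start_index).toNat
decreasing_by
  rw [min_eq_left h]
  omega

def get_start_end_index (total_rows : Int) (chunk_size : Int) : List (Int × Int) :=
  pvLoopA total_rows chunk_size 0 (min chunk_size total_rows) (min_le_right _ _)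

-- ===== PORT B =====
def get_start_end_index_alt (total_rows : Int) (chunk_size : Int) : List (Int × Int) :=
  if chunk_size ≤ 0 ∨ total_rows ≤ 0 then []
  else
    let bounds := PySem.List.pyRange 0 total_rows chunk_size ++ [total_rows]
    bounds.zip (bounds.drop 1)

-- ===== PRECONDITION & SPEC =====
def Spec_get_start_end_index (total_rows : Int) (chunk_size : Int) (out : List (Int × Int)) : Prop := out = get_start_end_index_alt total_rows chunk_size
instance (total_rows : Int) (chunk_size : Int) (out : List (Int × Int)) : Decidable (Spec_get_start_end_index total_rows chunk_size out) := by unfold Spec_get_start_end_index; infer_instance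

-- ===== CLAIM (what is proved, stated in full; the proofs are below) =====
def Claim_equal_get_start_end_index : Prop := ∀ (total_rows : Int) (chunk_size : Int), Dom_get_start_end_index total_rows chunk_size → Spec_get_start_end_index total_rows chunk_size (get_start_end_index total_rows chunk_size)

-- ===== LEMMAS AND PROOFS =====

lemma pyRange_pos_nil (a b s : Int) (hs : 0 < s) (hab : b ≤ a) :
    PySem.List.pyRange a b s = [] := by
  rw [PySem.List.pyRange_of_pos a b hs, if_neg (by omega)]
  simp

lemma pyRange_pos_cons (a b s : Int) (hs : 0 < s) (hab : a < b) :
    PySem.List.pyRange a b s = a :: PySem.List.pyRange (a + s) b s := by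
  rw [PySem.List.pyRange_of_pos a b hs, PySem.List.pyRange_of_pos (a + s) b hs,
    if_pos hab]
  have hcount : ((b - a + s - 1) / s).toNat =
      (if a + s < b then ((b - (a + s) + s - 1) / s).toNat else 0) + 1 := by
    split_ifs with h2
    · have : b - a + s - 1 = (b - (a + s) + s - 1) + 1 * s := by ring
      rw [this, Int.add_mul_ediv_right _ _ (by omega : s ≠ 0)]
      have h0 : 0 ≤ (b - (a + s) + s - 1) / s :=
        Int.ediv_nonneg (by omega) (by omega)
      omega
    · have hlo : s ≤ b - a + s - 1 := by omega
      have hhi : b - a + s - 1 < 2 * s := by omega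
      have : (b - a + s - 1) / s = 1 := by
        have h1 : 1 ≤ (b - a + s - 1) / s := by
          have := Int.le_ediv_iff_mul_le (a := 1) (b := b - a + s - 1) (c := s) hs
          omega
        have h2' : (b - a + s - 1) / s < 2 := by
          have := Int.ediv_lt_iff_lt_mul (a := b - a + s - 1) (b := 2) (c := s) hs
          omega
        omega
      omega
  rw [hcount, List.range_succ_eq_map]
  simp only [List.map_cons, List.map_map]
  congr 1
  · simp
  · apply List.map_congr_left
    intro k _
    simp only [Function.comp_apply, Nat.succ_eq_add_one]
    push_cast
    ring

lemma pvLoopA_congr (max_index chunk_size start_index e e' : Int) (he : e = e')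
    (h : e ≤ max_index) :
    pvLoopA max_index chunk_size start_index e h
      = pvLoopA max_index chunk_size start_index e' (he ▸ h) := by
  subst he; rfl

-- A's loop, started at `start`, produces the map form over the stride range.
lemma loopA_eq (chunk_size total_rows : Int) (hc : 0 < chunk_size) (start : Int) :
    pvLoopA total_rows chunk_size start (min (start + chunk_size) total_rows)
        (min_le_right _ _) =
      (PySem.List.pyRange start total_rows chunk_size).map
        (fun i => (i, min (i + chunk_size) total_rows)) := by
  by_cases hst : start < total_rows
  · rw [pvLoopA, dif_pos (by omega : start < min (start + chunk_size) total_rows)]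
    rw [pyRange_pos_cons start total_rows chunk_size hc hst, List.map_cons]
    congr 1
    by_cases hnext : start + chunk_size < total_rows
    · have hs' : min (min (start + chunk_size) total_rows) total_rows
          = start + chunk_size := by omega
      have he' : min (min (start + chunk_size) total_rows + chunk_size) total_rows
          = min (start + chunk_size + chunk_size) total_rows := by omega
      rw [hs', pvLoopA_congr _ _ _ _ _ he' _]
      exact loopA_eq chunk_size total_rows hc (start + chunk_size)
    · have hs' : min (min (start + chunk_size) total_rows) total_rows
          = total_rows := by omega
      have he' : min (min (start + chunk_size) total_rows + chunk_size) total_rows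
          = total_rows := by omega
      rw [hs', pvLoopA_congr _ _ _ _ _ he' _,
        pyRange_pos_nil (start + chunk_size) total_rows chunk_size hc (by omega),
        pvLoopA, dif_neg (lt_irrefl total_rows)]
      simp
  · rw [pvLoopA, dif_neg (by omega : ¬ start < min (start + chunk_size) total_rows)]
    rw [pyRange_pos_nil start total_rows chunk_size hc (by omega)]
    simp
termination_by (total_rows - start).toNat
decreasing_by omega

-- B's boundary-zip, started at `a`, produces the same map form.
lemma zipB_eq (chunk_size total_rows : Int) (hc : 0 < chunk_size) (a : Int) :
    ((PySem.List.pyRange a total_rows chunk_size ++ [total_rows]).zip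
        ((PySem.List.pyRange a total_rows chunk_size ++ [total_rows]).drop 1)) =
      (PySem.List.pyRange a total_rows chunk_size).map
        (fun i => (i, min (i + chunk_size) total_rows)) := by
  by_cases hst : a < total_rows
  · rw [pyRange_pos_cons a total_rows chunk_size hc hst]
    by_cases hnext : a + chunk_size < total_rows
    · have ih := zipB_eq chunk_size total_rows hc (a + chunk_size)
      rw [pyRange_pos_cons (a + chunk_size) total_rows chunk_size hc hnext] at ih ⊢
      have hmin : min (a + chunk_size) total_rows = a + chunk_size := by omega
      simp only [List.cons_append, List.drop_succ_cons, List.drop_zero,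
        List.zip_cons_cons, List.map_cons, hmin] at ih ⊢
      exact congrArg (List.cons _) ih
    · rw [pyRange_pos_nil (a + chunk_size) total_rows chunk_size hc (by omega)]
      have hmin : min (a + chunk_size) total_rows = total_rows := by omega
      simp [hmin]
  · rw [pyRange_pos_nil a total_rows chunk_size hc (by omega)]
    simp
termination_by (total_rows - a).toNat
decreasing_by omega

-- ===== VERDICT (by name: the statement is the Claim_ definition above) =====
theorem get_start_end_index_spec : Claim_equal_get_start_end_index := by
  intro total_rows chunk_size _
  unfold Spec_get_start_end_index get_start_end_index get_start_end_index_alt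
  by_cases hdeg : chunk_size ≤ 0 ∨ total_rows ≤ 0
  · rw [if_pos hdeg, pvLoopA,
      dif_neg (by rcases hdeg with h | h <;> omega : ¬ (0:Int) < min chunk_size total_rows)]
  · rw [if_neg hdeg]
    have hc : 0 < chunk_size := by omega
    have hA := loopA_eq chunk_size total_rows hc 0
    have hB := zipB_eq chunk_size total_rows hc 0
    simp only [zero_add] at hA
    rw [hA, ← hB]
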